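-- pv_equiv track=rewrite | github.com/charles-so/SuperMarioBros-AI-Strategies | Q_learning4/ql_v3.py | mario_in_mid_air
-- ===== SOURCE A (Python) =====
-- def _compute_bounds(mario_location, horizontal_range, vertical_range=None, inverted=False, check_right_only=False, check_full_vertical_range=False):
--     if check_right_only:
--         start_x = mario_location[0]
--         end_x = mario_location[0] + horizontal_range
--     else:
--         start_x = mario_location[0] - horizontal_range
--         end_x = mario_location[0] + horizontal_range
--
--     if vertical_range is None:
--         return start_x, end_x
--
--     if check_full_vertical_range:
--         lower_y = mario_location[1] + vertical_range
--         upper_y = mario_location[1] - vertical_range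
--     elif inverted:
--         lower_y = mario_location[1] + vertical_range
--         upper_y = mario_location[1]
--     else:
--         lower_y = mario_location[1]
--         upper_y = lower_y - vertical_range
--
--     return start_x, end_x, lower_y, upper_y
--
-- def mario_in_mid_air(mario_location, enemy_locations, block_locations, horizontal_range=15, vertical_range=16):
--     # Look for a brick immediately below Mario and within the specified x range
--     start_x, end_x, lower_y, upper_y = _compute_bounds(mario_location, horizontal_range, vertical_range, inverted=True)
--     block_below_mario = [block for block in block_locations if block[2] == 'block' and start_x <= block[0][0] <= end_x and upper_y <= block[0][1] <= lower_y]
--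
--     # Look for a enemy immediately below Mario and within the specified x range
--     start_x, end_x, lower_y, upper_y = _compute_bounds(mario_location, horizontal_range, vertical_range, inverted=True)
--     enemy_below_mario = [enemy for enemy in enemy_locations if start_x <= enemy[0][0] <= end_x and upper_y <= enemy[0][1] <= lower_y]
--
--     # Look for a pipe immediately below Mario and within the specified x range
--     start_x, end_x, lower_y, upper_y = _compute_bounds(mario_location, horizontal_range=32, vertical_range=vertical_range, inverted=True)
--     pipe_below_mario = [block for block in block_locations if block[2] == 'pipe' and start_x <= block[0][0] <= end_x and upper_y <= block[0][1] <= lower_y]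
--
--     return not (block_below_mario or enemy_below_mario or pipe_below_mario)
-- ===== SOURCE B (Python) =====
-- def mario_in_mid_air(mario_location, enemy_locations, block_locations, horizontal_range=15, vertical_range=16):
--     # Aggregate-then-threshold: instead of testing every obstacle against a bounding
--     # box, compute the minimum horizontal distance |x - mario_x| of each kind of
--     # obstacle in the vertical band below Mario, then compare the three minima
--     # against their horizontal thresholds once.
--     mx, my = mario_location
--     nearest_block = None
--     nearest_pipe = None
--     for block in block_locations:
--         bx, by = block[0]
--         if my <= by <= my + vertical_range:
--             d = abs(bx - mx)
--             if block[2] == 'block':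
--                 if nearest_block is None or d < nearest_block:
--                     nearest_block = d
--             elif block[2] == 'pipe':
--                 if nearest_pipe is None or d < nearest_pipe:
--                     nearest_pipe = d
--     nearest_enemy = None
--     for enemy in enemy_locations:
--         ex, ey = enemy[0]
--         if my <= ey <= my + vertical_range:
--             d = abs(ex - mx)
--             if nearest_enemy is None or d < nearest_enemy:
--                 nearest_enemy = d
--     return ((nearest_block is None or nearest_block > horizontal_range)
--             and (nearest_pipe is None or nearest_pipe > 32)
--             and (nearest_enemy is None or nearest_enemy > horizontal_range))
-- ===== Notes on version B (the rewrite author's own statement) =====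
-- stated objective: alternative
-- what changed: B replaces A's three box-membership filter comprehensions (two of which re-scan block_locations) with an aggregate-then-threshold algorithm: one pass per list maintaining the minimum horizontal distance |x - mario_x| of each obstacle kind inside the vertical band, then a single final comparison of the three minima against their thresholds (using |x-mx| <= t iff mx-t <= x <= mx+t).
import Mathlib
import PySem

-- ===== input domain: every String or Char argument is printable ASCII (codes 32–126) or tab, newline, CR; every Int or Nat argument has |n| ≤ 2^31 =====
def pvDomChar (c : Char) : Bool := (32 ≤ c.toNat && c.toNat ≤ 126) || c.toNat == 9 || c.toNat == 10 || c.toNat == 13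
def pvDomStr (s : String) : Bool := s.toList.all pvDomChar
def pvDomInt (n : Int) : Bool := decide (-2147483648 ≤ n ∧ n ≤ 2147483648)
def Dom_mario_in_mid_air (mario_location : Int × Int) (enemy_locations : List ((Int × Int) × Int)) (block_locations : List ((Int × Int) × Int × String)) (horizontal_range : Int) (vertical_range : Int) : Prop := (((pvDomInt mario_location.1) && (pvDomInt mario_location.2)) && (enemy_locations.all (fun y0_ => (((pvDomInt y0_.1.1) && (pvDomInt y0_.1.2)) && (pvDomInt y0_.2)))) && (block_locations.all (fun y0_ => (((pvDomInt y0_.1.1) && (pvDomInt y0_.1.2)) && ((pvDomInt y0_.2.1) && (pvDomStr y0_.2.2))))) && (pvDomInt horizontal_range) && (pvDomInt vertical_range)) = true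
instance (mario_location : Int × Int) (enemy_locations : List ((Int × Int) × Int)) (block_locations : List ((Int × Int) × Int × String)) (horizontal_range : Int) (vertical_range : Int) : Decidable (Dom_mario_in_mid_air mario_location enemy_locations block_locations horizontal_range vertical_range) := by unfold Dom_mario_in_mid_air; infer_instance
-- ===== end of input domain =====

-- B replaces A's three box-membership filter comprehensions with an
-- aggregate-then-threshold pass: it computes the minimum horizontal distance
-- |x - mario_x| of each obstacle kind in the vertical band and compares the
-- three minima against the thresholds once (objective: alternative).

-- ===== PORT A =====
-- _compute_bounds; vertical_range is always given in A's calls (the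
-- vertical_range=None 2-tuple branch is unreachable from mario_in_mid_air).
def compute_bounds (mario_location : Int × Int) (horizontal_range : Int) (vertical_range : Int) (inverted : Bool) (check_right_only : Bool) (check_full_vertical_range : Bool) : Int × Int × Int × Int :=
  let start_x := if check_right_only then mario_location.1 else mario_location.1 - horizontal_range
  let end_x := mario_location.1 + horizontal_range
  let ly_uy :=
    if check_full_vertical_range then (mario_location.2 + vertical_range, mario_location.2 - vertical_range)
    else if inverted then (mario_location.2 + vertical_range, mario_location.2)
    else (mario_location.2, mario_location.2 - vertical_range)
  (start_x, end_x, ly_uy.1, ly_uy.2)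

def mario_in_mid_air (mario_location : Int × Int) (enemy_locations : List ((Int × Int) × Int)) (block_locations : List ((Int × Int) × Int × String)) (horizontal_range : Int) (vertical_range : Int) : Bool :=
  let bd1 := compute_bounds mario_location horizontal_range vertical_range true false false
  let block_below_mario := block_locations.filter (fun b => b.2.2 == "block" && decide (bd1.1 ≤ b.1.1) && decide (b.1.1 ≤ bd1.2.1) && decide (bd1.2.2.2 ≤ b.1.2) && decide (b.1.2 ≤ bd1.2.2.1))
  let bd2 := compute_bounds mario_location horizontal_range vertical_range true false false
  let enemy_below_mario := enemy_locations.filter (fun e => decide (bd2.1 ≤ e.1.1) && decide (e.1.1 ≤ bd2.2.1) && decide (bd2.2.2.2 ≤ e.1.2) && decide (e.1.2 ≤ bd2.2.2.1))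
  let bd3 := compute_bounds mario_location 32 vertical_range true false false
  let pipe_below_mario := block_locations.filter (fun b => b.2.2 == "pipe" && decide (bd3.1 ≤ b.1.1) && decide (b.1.1 ≤ bd3.2.1) && decide (bd3.2.2.2 ≤ b.1.2) && decide (b.1.2 ≤ bd3.2.2.1))
  block_below_mario.isEmpty && enemy_below_mario.isEmpty && pipe_below_mario.isEmpty

-- ===== PORT B =====
-- 'nearest_block is None or d < nearest_block: nearest_block = d'
def minUpd (o : Option Int) (d : Int) : Option Int :=
  match o with
  | none => some d
  | some d0 => if d < d0 then some d else some d0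

-- the first loop of Source B: state (nearest_block, nearest_pipe)
def blockMins (mx my vr : Int) (bs : List ((Int × Int) × Int × String)) : Option Int × Option Int :=
  bs.foldl (fun st b =>
    if my ≤ b.1.2 ∧ b.1.2 ≤ my + vr then
      let d := |b.1.1 - mx|
      if b.2.2 == "block" then (minUpd st.1 d, st.2)
      else if b.2.2 == "pipe" then (st.1, minUpd st.2 d)
      else st
    else st) (none, none)

-- the second loop of Source B: state nearest_enemy
def enemyMin (mx my vr : Int) (es : List ((Int × Int) × Int)) : Option Int :=
  es.foldl (fun st e =>
    if my ≤ e.1.2 ∧ e.1.2 ≤ my + vr then minUpd st |e.1.1 - mx|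
    else st) none

-- 'o is None or o > t'
def clearAt (o : Option Int) (t : Int) : Bool :=
  match o with
  | none => true
  | some d => decide (t < d)

def mario_in_mid_air_alt (mario_location : Int × Int) (enemy_locations : List ((Int × Int) × Int)) (block_locations : List ((Int × Int) × Int × String)) (horizontal_range : Int) (vertical_range : Int) : Bool :=
  let mx := mario_location.1
  let my := mario_location.2
  let mins := blockMins mx my vertical_range block_locations
  clearAt mins.1 horizontal_range && clearAt mins.2 32 &&
    clearAt (enemyMin mx my vertical_range enemy_locations) horizontal_range

-- ===== PRECONDITION & SPEC =====
def Spec_mario_in_mid_air (mario_location : Int × Int) (enemy_locations : List ((Int × Int) × Int)) (block_locations : List ((Int × Int) × Int × String)) (horizontal_range : Int) (vertical_range : Int) (out : Bool) : Prop := out = mario_in_mid_air_alt mario_location enemy_locations block_locations horizontal_range vertical_range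
instance (mario_location : Int × Int) (enemy_locations : List ((Int × Int) × Int)) (block_locations : List ((Int × Int) × Int × String)) (horizontal_range : Int) (vertical_range : Int) (out : Bool) : Decidable (Spec_mario_in_mid_air mario_location enemy_locations block_locations horizontal_range vertical_range out) := by unfold Spec_mario_in_mid_air; infer_instance

-- ===== CLAIM (what is proved, stated in full; the proofs are below) =====
def Claim_equal_mario_in_mid_air : Prop := ∀ (mario_location : Int × Int) (enemy_locations : List ((Int × Int) × Int)) (block_locations : List ((Int × Int) × Int × String)) (horizontal_range : Int) (vertical_range : Int), Dom_mario_in_mid_air mario_location enemy_locations block_locations horizontal_range vertical_range → Spec_mario_in_mid_air mario_location enemy_locations block_locations horizontal_range vertical_range (mario_in_mid_air mario_location enemy_locations block_locations horizontal_range vertical_range)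

-- ===== LEMMAS AND PROOFS =====

lemma filter_isEmpty_eq_not_any {α : Type} (p : α → Bool) (l : List α) :
    (l.filter p).isEmpty = !l.any p := by
  induction l with
  | nil => rfl
  | cons a t ih => by_cases h : p a <;> simp [h, ih]

lemma clearAt_minUpd (o : Option Int) (d t : Int) :
    clearAt (minUpd o d) t = (clearAt o t && decide (t < d)) := by
  cases o with
  | none => simp [minUpd, clearAt]
  | some d0 =>
    simp only [minUpd, clearAt]
    split_ifs <;> rw [Bool.eq_iff_iff] <;> simp <;> omega

lemma abs_le_box (x mx t : Int) : (t < |x - mx|) ↔ ¬(mx - t ≤ x ∧ x ≤ mx + t) := by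
  rcases abs_cases (x - mx) with ⟨h1, h2⟩ | ⟨h1, h2⟩ <;> omega

lemma blockMins_clear (mx my vr hr : Int) (bs : List ((Int × Int) × Int × String)) (st : Option Int × Option Int) :
    clearAt (bs.foldl (fun st b =>
      if my ≤ b.1.2 ∧ b.1.2 ≤ my + vr then
        let d := |b.1.1 - mx|
        if b.2.2 == "block" then (minUpd st.1 d, st.2)
        else if b.2.2 == "pipe" then (st.1, minUpd st.2 d)
        else st
      else st) st).1 hr
      = (clearAt st.1 hr &&
         !bs.any (fun b => b.2.2 == "block" && decide (mx - hr ≤ b.1.1) && decide (b.1.1 ≤ mx + hr) && decide (my ≤ b.1.2) && decide (b.1.2 ≤ my + vr))) ∧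
    clearAt (bs.foldl (fun st b =>
      if my ≤ b.1.2 ∧ b.1.2 ≤ my + vr then
        let d := |b.1.1 - mx|
        if b.2.2 == "block" then (minUpd st.1 d, st.2)
        else if b.2.2 == "pipe" then (st.1, minUpd st.2 d)
        else st
      else st) st).2 32
      = (clearAt st.2 32 &&
         !bs.any (fun b => b.2.2 == "pipe" && decide (mx - 32 ≤ b.1.1) && decide (b.1.1 ≤ mx + 32) && decide (my ≤ b.1.2) && decide (b.1.2 ≤ my + vr))) := by
  induction bs generalizing st with
  | nil => simp
  | cons b rest ih =>
    simp only [List.foldl_cons, List.any_cons]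
    rcases ih (if my ≤ b.1.2 ∧ b.1.2 ≤ my + vr then
        if b.2.2 == "block" then (minUpd st.1 |b.1.1 - mx|, st.2)
        else if b.2.2 == "pipe" then (st.1, minUpd st.2 |b.1.1 - mx|)
        else st
      else st) with ⟨ih1, ih2⟩
    constructor
    · rw [ih1]
      split_ifs with hv hb hp <;>
        · rw [Bool.eq_iff_iff]
          simp only [clearAt_minUpd, Bool.and_eq_true, Bool.or_eq_true, Bool.or_eq_false_iff, Bool.and_eq_false_iff, decide_eq_false_iff_not, beq_eq_false_iff_ne,
            Bool.not_eq_true', decide_eq_true_eq, abs_le_box, beq_iff_eq] at *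
          first
            | tauto
            | (have hno : b.2.2 ≠ "pipe" := by rw [hb]; exact (by decide)
               tauto)
            | (have hno : b.2.2 ≠ "block" := by rw [hp]; exact (by decide)
               tauto)
    · rw [ih2]
      split_ifs with hv hb hp <;>
        · rw [Bool.eq_iff_iff]
          simp only [clearAt_minUpd, Bool.and_eq_true, Bool.or_eq_true, Bool.or_eq_false_iff, Bool.and_eq_false_iff, decide_eq_false_iff_not, beq_eq_false_iff_ne,
            Bool.not_eq_true', decide_eq_true_eq, abs_le_box, beq_iff_eq] at *
          first
            | tauto
            | (have hno : b.2.2 ≠ "pipe" := by rw [hb]; exact (by decide)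
               tauto)
            | (have hno : b.2.2 ≠ "block" := by rw [hp]; exact (by decide)
               tauto)

lemma enemyMin_clear (mx my vr hr : Int) (es : List ((Int × Int) × Int)) (st : Option Int) :
    clearAt (es.foldl (fun st e =>
      if my ≤ e.1.2 ∧ e.1.2 ≤ my + vr then minUpd st |e.1.1 - mx|
      else st) st) hr
      = (clearAt st hr &&
         !es.any (fun e => decide (mx - hr ≤ e.1.1) && decide (e.1.1 ≤ mx + hr) && decide (my ≤ e.1.2) && decide (e.1.2 ≤ my + vr))) := by
  induction es generalizing st with
  | nil => simp
  | cons e rest ih =>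
    simp only [List.foldl_cons, List.any_cons]
    rw [ih]
    split_ifs with hv <;>
      · rw [Bool.eq_iff_iff]
        simp only [clearAt_minUpd, Bool.and_eq_true, Bool.or_eq_true, Bool.or_eq_false_iff, Bool.and_eq_false_iff, decide_eq_false_iff_not, beq_eq_false_iff_ne,
          Bool.not_eq_true', decide_eq_true_eq, abs_le_box] at *
        tauto

-- ===== VERDICT (by name: the statement is the Claim_ definition above) =====
theorem mario_in_mid_air_spec : Claim_equal_mario_in_mid_air := by
  intro m es bs hr vr _
  unfold Spec_mario_in_mid_air
  simp only [mario_in_mid_air, mario_in_mid_air_alt, compute_bounds,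
    blockMins, enemyMin, filter_isEmpty_eq_not_any,
    if_neg Bool.false_ne_true]
  rcases blockMins_clear m.1 m.2 vr hr bs (none, none) with ⟨h1, h2⟩
  rw [h1, h2, enemyMin_clear]
  simp only [clearAt, Bool.true_and]
  rw [Bool.eq_iff_iff]
  simp only [Bool.and_eq_true, Bool.not_eq_true']
  tauto
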